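-- pv_equiv track=rewrite | github.com/yangCode-res/HyAgent | utils/pdf2md.py | _clean_stdout
-- ===== SOURCE A (Python) =====
-- def _clean_stdout(s: str) -> str:
--     # 去掉 <|ref|> 标签、det 坐标、分隔线和显存日志，只保留正文行
--     lines = []
--     for ln in s.splitlines():
--         t = ln.strip()
--         if not t:
--             lines.append("")  # 保留段落空行
--             continue
--         if t.startswith("<|") and t.endswith("|>"):
--             continue
--         if t.startswith("<|ref|>") or t.startswith("<|det|>"):
--             continue
--         if t.startswith("====") or t.startswith("BASE:") or t.startswith("PATCHES:"):
--             continue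
--         if t.lower().startswith(("image size:", "valid image tokens", "output texts tokens", "compression ratio")):
--             continue
--         lines.append(ln)
--     # 连续空行压成单空行
--     out, prev_blank = [], False
--     for ln in lines:
--         if ln.strip() == "":
--             if not prev_blank:
--                 out.append("")
--             prev_blank = True
--         else:
--             out.append(ln)
--             prev_blank = False
--     return "\n".join(out).strip()
-- ===== SOURCE B (Python) =====
-- def _clean_stdout(s: str) -> str:
--     # Single fused pass: filter noise lines and collapse blank runs together.
--     out = []
--     prev_blank = False
--     for ln in s.splitlines():
--         t = ln.strip()
--         if not t:
--             if not prev_blank: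
--                 out.append("")
--             prev_blank = True
--         elif not (
--             (t.startswith("<|") and t.endswith("|>"))
--             or t.startswith(("<|ref|>", "<|det|>", "====", "BASE:", "PATCHES:"))
--             or t.lower().startswith(("image size:", "valid image tokens", "output texts tokens", "compression ratio"))
--         ):
--             out.append(ln)
--             prev_blank = False
--     return "\n".join(out).strip()
-- ===== Notes on version B (the rewrite author's own statement) =====
-- stated objective: simpler
-- what changed: Fused A's two sequential passes (filter noise lines into an intermediate list, then collapse blank runs) into a single loop with a prev_blank flag and no intermediate list.
import Mathlib
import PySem

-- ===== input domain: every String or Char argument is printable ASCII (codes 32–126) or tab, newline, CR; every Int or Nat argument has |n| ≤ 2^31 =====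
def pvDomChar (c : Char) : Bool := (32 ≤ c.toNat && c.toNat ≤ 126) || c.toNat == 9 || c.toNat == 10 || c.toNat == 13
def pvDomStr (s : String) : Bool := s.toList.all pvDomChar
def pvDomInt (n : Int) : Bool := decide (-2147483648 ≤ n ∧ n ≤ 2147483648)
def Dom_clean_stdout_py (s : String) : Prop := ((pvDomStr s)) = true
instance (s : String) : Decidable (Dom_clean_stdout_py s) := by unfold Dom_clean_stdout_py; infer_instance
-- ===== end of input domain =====

-- B fuses A's two sequential passes (filter noise lines, then collapse blank runs) into one loop; objective: simpler (one pass, no intermediate list).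

-- ===== PORT A =====
-- first loop of A: filter, keeping "" for blank lines
def pvFilterA : List String → List String
  | [] => []
  | ln :: rest =>
    let t := PySem.Str.strip ln
    if t = "" then "" :: pvFilterA rest
    else if PySem.Str.startswith t "<|" && PySem.Str.endswith t "|>" then pvFilterA rest
    else if PySem.Str.startswith t "<|ref|>" || PySem.Str.startswith t "<|det|>" then pvFilterA rest
    else if PySem.Str.startswith t "====" || PySem.Str.startswith t "BASE:" || PySem.Str.startswith t "PATCHES:" then pvFilterA rest
    else if (PySem.Str.startswith (PySem.Str.lower t) "image size:" || PySem.Str.startswith (PySem.Str.lower t) "valid image tokens" || PySem.Str.startswith (PySem.Str.lower t) "output texts tokens" || PySem.Str.startswith (PySem.Str.lower t) "compression ratio") then pvFilterA rest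
    else ln :: pvFilterA rest

-- second loop of A: collapse consecutive blank lines, state prev_blank
def pvCollapseA : List String → Bool → List String
  | [], _ => []
  | ln :: rest, prevBlank =>
    if PySem.Str.strip ln = "" then
      (if prevBlank then pvCollapseA rest true else "" :: pvCollapseA rest true)
    else ln :: pvCollapseA rest false

def clean_stdout_py (s : String) : String :=
  PySem.Str.strip (PySem.Str.join "\n" (pvCollapseA (pvFilterA (PySem.Str.splitlines s)) false))

-- ===== PORT B =====
-- B's filter predicate on the stripped line
def pvKeepB (t : String) : Bool :=
  !((PySem.Str.startswith t "<|" && PySem.Str.endswith t "|>")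
    || (PySem.Str.startswith t "<|ref|>" || PySem.Str.startswith t "<|det|>"
        || PySem.Str.startswith t "====" || PySem.Str.startswith t "BASE:" || PySem.Str.startswith t "PATCHES:")
    || (PySem.Str.startswith (PySem.Str.lower t) "image size:" || PySem.Str.startswith (PySem.Str.lower t) "valid image tokens"
        || PySem.Str.startswith (PySem.Str.lower t) "output texts tokens" || PySem.Str.startswith (PySem.Str.lower t) "compression ratio"))

-- B's single fused loop, state prev_blank
def pvFusedB : List String → Bool → List String
  | [], _ => []
  | ln :: rest, prevBlank =>
    let t := PySem.Str.strip ln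
    if t = "" then
      (if prevBlank then pvFusedB rest true else "" :: pvFusedB rest true)
    else if pvKeepB t then ln :: pvFusedB rest false
    else pvFusedB rest prevBlank

def clean_stdout_py_alt (s : String) : String :=
  PySem.Str.strip (PySem.Str.join "\n" (pvFusedB (PySem.Str.splitlines s) false))

-- ===== PRECONDITION & SPEC =====
def Spec_clean_stdout_py (s : String) (out : String) : Prop := out = clean_stdout_py_alt s
instance (s : String) (out : String) : Decidable (Spec_clean_stdout_py s out) := by unfold Spec_clean_stdout_py; infer_instance

-- ===== CLAIM (what is proved, stated in full; the proofs are below) =====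
def Claim_equal_clean_stdout_py : Prop := ∀ (s : String), Dom_clean_stdout_py s → Spec_clean_stdout_py s (clean_stdout_py s)

-- ===== LEMMAS AND PROOFS =====

-- fusing the two passes: collapsing A's filtered list equals B's fused loop
theorem pvCollapse_filter_eq_fused (ls : List String) :
    ∀ pb : Bool, pvCollapseA (pvFilterA ls) pb = pvFusedB ls pb := by
  induction ls with
  | nil => intro pb; rfl
  | cons ln rest ih =>
    intro pb
    simp only [pvFilterA, pvFusedB, pvKeepB]
    split_ifs <;> cases pb <;> simp_all [pvCollapseA, ih] <;> tauto

-- ===== VERDICT (by name: the statement is the Claim_ definition above) =====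
theorem clean_stdout_py_spec : Claim_equal_clean_stdout_py := by
  intro s _
  unfold Spec_clean_stdout_py clean_stdout_py clean_stdout_py_alt
  rw [pvCollapse_filter_eq_fused]
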